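-- pv_equiv track=rewrite | github.com/CLEVER1337/acmp_agent | solutions/505.py | match_section
-- ===== SOURCE A (Python) =====
-- def normalize_section(section):
--     min_val = min(section)
--     normalized = [h - min_val for h in section]
--     return normalized
--
-- def match_section(section, templates):
--     normalized_section = normalize_section(section)
--
--     best_match_id = None
--     best_diff = float('inf')
--
--     for template_id, template_heights in templates.items():
--         normalized_template = normalize_section(template_heights)
--
--         diff = sum(abs(a - b) for a, b in zip(normalized_section, normalized_template))
--
--         if diff < best_diff:
--             best_diff = diff
--             best_match_id = template_id
--
--     return best_match_id if best_diff == 0 else '-'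
-- ===== SOURCE B (Python) =====
-- def normalize_section(section):
--     min_val = min(section)
--     normalized = [h - min_val for h in section]
--     return normalized
--
-- def match_section(section, templates):
--     normalized_section = normalize_section(section)
--     for template_id, template_heights in templates.items():
--         if all(a == b for a, b in zip(normalized_section, normalize_section(template_heights))):
--             return template_id
--     return '-'
-- ===== Notes on version B (the rewrite author's own statement) =====
-- stated objective: simpler
-- what changed: Drops the best_diff/best_match_id minimum-tracking state and the absolute-difference sum entirely: B returns the first template whose normalized heights are element-wise equal to the normalized section over zip, and '-' if none, which is exactly when A's tracked minimum is 0. Pre_ excludes empty section/template height lists (min() raises ValueError there) and association lists with duplicate template ids, which no Python dict argument can represent.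
import Mathlib
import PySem

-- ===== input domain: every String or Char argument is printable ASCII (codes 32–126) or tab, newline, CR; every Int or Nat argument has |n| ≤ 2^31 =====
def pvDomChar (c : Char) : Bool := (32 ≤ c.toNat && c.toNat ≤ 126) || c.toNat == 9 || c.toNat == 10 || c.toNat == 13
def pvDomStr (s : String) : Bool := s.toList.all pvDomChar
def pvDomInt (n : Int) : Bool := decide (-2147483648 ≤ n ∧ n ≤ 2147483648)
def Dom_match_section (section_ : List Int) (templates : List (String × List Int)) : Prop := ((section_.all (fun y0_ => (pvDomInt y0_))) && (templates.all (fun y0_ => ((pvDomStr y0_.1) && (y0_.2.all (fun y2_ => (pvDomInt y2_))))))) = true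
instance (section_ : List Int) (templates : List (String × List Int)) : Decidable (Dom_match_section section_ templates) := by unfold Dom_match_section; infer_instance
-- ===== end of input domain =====

-- B drops A's best_diff/best_match_id minimum tracking: it returns the first template whose
-- normalized heights are element-wise equal (over zip) to the normalized section, else '-'.

-- ===== PORT A =====
-- shared module-level helper normalize_section (identical in Source A and Source B);
-- min() of an empty list raises ValueError in Python: Pre_ excludes empty lists, the .getD 0 is never reached there
def normalize_section (sec : List Int) : List Int :=
  let min_val := (PySem.List.min? sec (fun x => x)).getD 0
  sec.map (fun h => h - min_val)

-- diff = sum(abs(a - b) for a, b in zip(...))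
def msDiff (ns nt : List Int) : Int :=
  (ns.zip nt).foldl (fun s p => s + |p.1 - p.2|) 0

-- one iteration of A's loop; best_diff = float('inf') is modelled as none (diff < inf is always true)
def msStep (ns : List Int) (st : Option String × Option Int) (t : String × List Int) :
    Option String × Option Int :=
  let nt := normalize_section t.2
  let diff := msDiff ns nt
  match st.2 with
  | none => (some t.1, some diff)
  | some bd => if diff < bd then (some t.1, some diff) else st

def match_section (section_ : List Int) (templates : List (String × List Int)) : String :=
  let ns := normalize_section section_
  match templates.foldl (msStep ns) (none, none) with
  | (some id, some bd) => if bd == 0 then id else "-"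
  | _ => "-"

-- ===== PORT B =====
-- B's loop: return the first template_id whose zipped normalized heights all match, else '-'
def msGo (ns : List Int) : List (String × List Int) → String
  | [] => "-"
  | t :: rest =>
      if (ns.zip (normalize_section t.2)).all (fun p => p.1 == p.2) then t.1 else msGo ns rest

def match_section_alt (section_ : List Int) (templates : List (String × List Int)) : String :=
  msGo (normalize_section section_) templates

-- ===== PRECONDITION & SPEC =====
-- Pre_ excludes (a) an empty section and empty template height lists, where Python's min() raises
-- ValueError, and (b) association lists with duplicate template ids, which no Python dict argument
-- can represent (the ports iterate the list; a dict collapses duplicates).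
def Pre_match_section (section_ : List Int) (templates : List (String × List Int)) : Prop :=
  section_ ≠ [] ∧ (∀ t ∈ templates, t.2 ≠ []) ∧ (templates.map Prod.fst).Nodup

instance (section_ : List Int) (templates : List (String × List Int)) :
    Decidable (Pre_match_section section_ templates) := by unfold Pre_match_section; infer_instance

def pvWitness_match_section : List Int × (List (String × List Int)) :=
  ([3, 1, 2], [("a", [5, 5]), ("b", [4, 2, 3])])

def Spec_match_section (section_ : List Int) (templates : List (String × List Int)) (out : String) : Prop := out = match_section_alt section_ templates
instance (section_ : List Int) (templates : List (String × List Int)) (out : String) : Decidable (Spec_match_section section_ templates out) := by unfold Spec_match_section; infer_instance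

-- ===== CLAIM (what is proved, stated in full; the proofs are below) =====
def Claim_equal_match_section : Prop := ∀ (section_ : List Int) (templates : List (String × List Int)), Dom_match_section section_ templates → Pre_match_section section_ templates → Spec_match_section section_ templates (match_section section_ templates)

-- ===== LEMMAS AND PROOFS =====

theorem msDiff_nonneg (ns nt : List Int) : 0 ≤ msDiff ns nt := by
  unfold msDiff
  have key : ∀ (l : List (Int × Int)) (a : Int),
      a ≤ l.foldl (fun s p => s + |p.1 - p.2|) a := by
    intro l
    induction l with
    | nil => intro a; simp
    | cons p rest ih =>
        intro a
        simp only [List.foldl_cons]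
        exact le_trans (by have := abs_nonneg (p.1 - p.2); omega) (ih (a + |p.1 - p.2|))
  exact key _ 0

theorem foldl_abs_nonneg (l : List (Int × Int)) :
    0 ≤ l.foldl (fun s q => s + |q.1 - q.2|) 0 := msDiff_nonneg l.unzip.1 l.unzip.2 |>.trans_eq (by
      unfold msDiff; rw [List.unzip_fst, List.unzip_snd, List.zip_map']
      simp)

theorem msDiff_eq_zero_iff (ns nt : List Int) :
    msDiff ns nt = 0 ↔ ((ns.zip nt).all (fun p => p.1 == p.2)) = true := by
  unfold msDiff
  have key : ∀ (l : List (Int × Int)),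
      l.foldl (fun s p => s + |p.1 - p.2|) 0 = 0 ↔ (l.all (fun p => p.1 == p.2)) = true := by
    intro l
    induction l with
    | nil => simp
    | cons p rest ih =>
        have shift : ∀ (m : List (Int × Int)) (a : Int),
            m.foldl (fun s q => s + |q.1 - q.2|) a = a + m.foldl (fun s q => s + |q.1 - q.2|) 0 := by
          intro m
          induction m with
          | nil => intro a; simp
          | cons q ms ihm =>
              intro a
              simp only [List.foldl_cons]
              rw [ihm (a + |q.1 - q.2|), ihm (0 + |q.1 - q.2|)]
              ring
        have hrest : 0 ≤ rest.foldl (fun s q => s + |q.1 - q.2|) 0 := foldl_abs_nonneg rest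
        simp only [List.foldl_cons, List.all_cons]
        rw [shift rest (0 + |p.1 - p.2|)]
        have habs := abs_nonneg (p.1 - p.2)
        constructor
        · intro h
          have h1 : |p.1 - p.2| = 0 := by omega
          have h2 : rest.foldl (fun s q => s + |q.1 - q.2|) 0 = 0 := by omega
          have : p.1 = p.2 := by
            have := abs_eq_zero.mp h1; omega
          simp [this, ih.mp h2]
        · intro h
          simp only [Bool.and_eq_true, beq_iff_eq] at h
          have h1 : p.1 - p.2 = 0 := by omega
          rw [abs_eq_zero.mpr h1, ih.mpr h.2]
          ring
  exact key _

-- A's fold never leaves a state whose tracked minimum is 0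
theorem msFold_zero (ns : List Int) (id : String) (ts : List (String × List Int)) :
    ts.foldl (msStep ns) (some id, some 0) = (some id, some 0) := by
  induction ts generalizing id with
  | nil => rfl
  | cons t rest ih =>
      have h := msDiff_nonneg ns (normalize_section t.2)
      simp only [List.foldl_cons, msStep]
      rw [if_neg (by omega)]
      exact ih id

-- finalization of A's fold from a positive tracked minimum equals B's first-match scan
theorem msFold_pos (ns : List Int) (ts : List (String × List Int)) :
    ∀ (id : String) (d : Int), 0 < d →
      (match ts.foldl (msStep ns) (some id, some d) with
       | (some i, some bd) => if bd == 0 then i else "-"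
       | _ => "-") = msGo ns ts := by
  induction ts with
  | nil =>
      intro id d hd
      simp only [List.foldl_nil, msGo]
      rw [if_neg (by simp; omega)]
  | cons t rest ih =>
      intro id d hd
      have hnn := msDiff_nonneg ns (normalize_section t.2)
      simp only [List.foldl_cons, msGo]
      by_cases hz : msDiff ns (normalize_section t.2) = 0
      · rw [if_pos ((msDiff_eq_zero_iff _ _).mp hz)]
        simp only [msStep, hz]
        rw [if_pos hd, msFold_zero]
        simp
      · rw [if_neg (by
          intro hall
          exact hz ((msDiff_eq_zero_iff _ _).mpr hall))]
        simp only [msStep]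
        by_cases hlt : msDiff ns (normalize_section t.2) < d
        · rw [if_pos hlt]
          exact ih _ _ (by omega)
        · rw [if_neg hlt]
          exact ih _ _ hd

theorem msMain (ns : List Int) (ts : List (String × List Int)) :
    (match ts.foldl (msStep ns) (none, none) with
     | (some i, some bd) => if bd == 0 then i else "-"
     | _ => "-") = msGo ns ts := by
  cases ts with
  | nil => rfl
  | cons t rest =>
      have hnn := msDiff_nonneg ns (normalize_section t.2)
      simp only [List.foldl_cons, msStep, msGo]
      by_cases hz : msDiff ns (normalize_section t.2) = 0
      · rw [if_pos ((msDiff_eq_zero_iff _ _).mp hz), hz, msFold_zero]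
        simp
      · rw [if_neg (by
          intro hall
          exact hz ((msDiff_eq_zero_iff _ _).mpr hall))]
        exact msFold_pos ns rest _ _ (by omega)

-- ===== VERDICT (by name: the statement is the Claim_ definition above) =====
theorem match_section_spec : Claim_equal_match_section := by
  intro section_ templates _ _
  unfold Spec_match_section match_section match_section_alt
  exact msMain (normalize_section section_) templates
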